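-- pv_equiv track=rewrite | github.com/Dra-Co/HackerRank | Problem Solving/Big Sorting.py | bigSorting
-- ===== SOURCE A (Python) =====
-- from collections import defaultdict
--
-- def bigSorting(unsorted):
--     # Write your code here
--     d = defaultdict(list)
--     res = []
--     for i in unsorted:
--         d[len(i)].append(i)
--     x=[d[n] for n in sorted(d)]
--     for i in range(0, len(x)):
--         res.extend(sorted(x[i]))
--     return res
-- ===== SOURCE B (Python) =====
-- def bigSorting(unsorted):
--     # one global stable sort: length first, then lexicographic
--     return sorted(unsorted, key=lambda s: (len(s), s))
-- ===== Notes on version B (the rewrite author's own statement) =====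
-- stated objective: simpler
-- what changed: Replaces A's build-a-length-indexed-dict, sort-the-keys, sort-each-bucket-and-concatenate pipeline with a single stable sort under the composite key (len(s), s).
import Mathlib
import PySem

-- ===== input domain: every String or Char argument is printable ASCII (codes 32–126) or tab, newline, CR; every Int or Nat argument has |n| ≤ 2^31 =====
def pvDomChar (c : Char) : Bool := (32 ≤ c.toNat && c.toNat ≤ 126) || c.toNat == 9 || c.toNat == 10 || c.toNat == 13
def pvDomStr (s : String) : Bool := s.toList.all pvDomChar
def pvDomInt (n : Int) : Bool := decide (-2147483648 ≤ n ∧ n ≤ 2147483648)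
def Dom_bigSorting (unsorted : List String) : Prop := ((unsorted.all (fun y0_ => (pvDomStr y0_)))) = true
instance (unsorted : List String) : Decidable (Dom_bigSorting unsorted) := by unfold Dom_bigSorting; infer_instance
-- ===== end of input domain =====

-- B replaces A's length-bucketed dict + per-bucket sorts by ONE stable sort on the composite key (len s, s); same return value, no mutation of the input in either version.

-- ===== PORT A =====
def bigSorting (unsorted : List String) : List String :=
  let d : PySem.Dict Int (List String) :=
    unsorted.foldl (fun d i => d.modify (PySem.Str.len i) [] (fun b => b ++ [i])) PySem.Dict.empty
  let x : List (List String) :=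
    (PySem.List.sorted d.keys (fun n => n) false).map (fun n => d.getD n [])
  (PySem.List.pyRange 0 (PySem.List.len x) 1).foldl
    (fun res i => res ++ PySem.List.sorted (PySem.List.pyGetD x i []) (fun s => s) false) []

-- ===== PORT B =====
def bigSorting_alt (unsorted : List String) : List String :=
  PySem.List.sorted2 unsorted (fun s => PySem.Str.len s) (fun s => s) false

-- ===== PRECONDITION & SPEC =====
def Spec_bigSorting (unsorted : List String) (out : List String) : Prop := out = bigSorting_alt unsorted
instance (unsorted : List String) (out : List String) : Decidable (Spec_bigSorting unsorted out) := by unfold Spec_bigSorting; infer_instance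

-- ===== CLAIM (what is proved, stated in full; the proofs are below) =====
def Claim_equal_bigSorting : Prop := ∀ (unsorted : List String), Dom_bigSorting unsorted → Spec_bigSorting unsorted (bigSorting unsorted)

-- ===== LEMMAS AND PROOFS =====

-- The ordering both programs realise: length first, then code-point lexicographic.
def lenLex (a b : String) : Prop :=
  PySem.Str.len a < PySem.Str.len b ∨ (PySem.Str.len a = PySem.Str.len b ∧ a ≤ b)

theorem lenLex_trans (a b c : String) (h1 : lenLex a b) (h2 : lenLex b c) : lenLex a c := by
  rcases h1 with h1 | ⟨h1, h1'⟩ <;> rcases h2 with h2 | ⟨h2, h2'⟩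
  · exact Or.inl (lt_trans h1 h2)
  · exact Or.inl (h2 ▸ h1)
  · exact Or.inl (h1 ▸ h2)
  · exact Or.inr ⟨h1.trans h2, le_trans h1' h2'⟩

theorem lenLex_antisymm (a b : String) (h1 : lenLex a b) (h2 : lenLex b a) : a = b := by
  rcases h1 with h1 | ⟨h1, h1'⟩ <;> rcases h2 with h2 | ⟨h2, h2'⟩
  · exact absurd h2 (lt_asymm h1)
  · exact absurd h1 (h2 ▸ lt_irrefl _)
  · exact absurd h2 (h1 ▸ lt_irrefl _)
  · exact le_antisymm h1' h2'

-- Generic: insertion keeps a Pairwise invariant compatible with the `before` test.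
theorem pairwise_insertBy {α : Type} (R : α → α → Prop) (before : α → α → Bool)
    (htrans : ∀ a b c, R a b → R b c → R a c)
    (htrue : ∀ a b, before a b = true → R a b)
    (hfalse : ∀ a b, before a b = false → R b a)
    (x : α) : ∀ ys : List α, ys.Pairwise R → (PySem.List.insertBy before x ys).Pairwise R := by
  intro ys
  induction ys with
  | nil => intro _; simp [PySem.List.insertBy]
  | cons y ys ih =>
    intro h
    rw [List.pairwise_cons] at h
    by_cases hb : before x y = true
    · simp only [PySem.List.insertBy, hb, if_true]
      refine List.pairwise_cons.2 ⟨?_, List.pairwise_cons.2 ⟨h.1, h.2⟩⟩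
      intro z hz
      rcases List.mem_cons.1 hz with rfl | hz
      · exact htrue _ _ hb
      · exact htrans _ _ _ (htrue _ _ hb) (h.1 z hz)
    · simp only [PySem.List.insertBy, hb]
      refine List.pairwise_cons.2 ⟨?_, ih h.2⟩
      intro w hw
      rcases (PySem.List.mem_insertBy before x w ys).1 hw with rfl | hw
      · exact hfalse _ _ (Bool.eq_false_iff.2 hb)
      · exact h.1 w hw

theorem pairwise_foldl_insertBy {α : Type} (R : α → α → Prop) (before : α → α → Bool)
    (htrans : ∀ a b c, R a b → R b c → R a c)
    (htrue : ∀ a b, before a b = true → R a b)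
    (hfalse : ∀ a b, before a b = false → R b a) :
    ∀ (xs acc : List α), acc.Pairwise R →
      (xs.foldl (fun acc x => PySem.List.insertBy before x acc) acc).Pairwise R := by
  intro xs
  induction xs with
  | nil => intro acc h; simpa using h
  | cons x xs ih =>
    intro acc h
    exact ih _ (pairwise_insertBy R before htrans htrue hfalse x acc h)

-- B's output is lenLex-ordered.
theorem alt_pairwise (unsorted : List String) : (bigSorting_alt unsorted).Pairwise lenLex := by
  unfold bigSorting_alt PySem.List.sorted2
  simp only [if_neg (by decide : ¬ (false = true))]
  apply pairwise_foldl_insertBy lenLex _ lenLex_trans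
  · intro a b hb
    simp only [Bool.or_eq_true, Bool.and_eq_true, Bool.not_eq_true', decide_eq_true_eq,
      decide_eq_false_iff_not] at hb
    rcases hb with hb | ⟨hb1, hb2⟩
    · exact Or.inl hb
    · rcases lt_or_eq_of_le (not_lt.1 hb1) with h | h
      · exact Or.inl h
      · exact Or.inr ⟨h, le_of_lt hb2⟩
  · intro a b hb
    simp only [Bool.or_eq_false_iff, Bool.and_eq_false_iff, Bool.not_eq_false', decide_eq_true_eq,
      decide_eq_false_iff_not] at hb
    obtain ⟨h1, h2⟩ := hb
    rcases h2 with h2 | h2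
    · exact Or.inl h2
    · rcases lt_or_eq_of_le (not_lt.1 h1) with h | h
      · exact Or.inl h
      · exact Or.inr ⟨h, not_lt.1 h2⟩
  · exact List.Pairwise.nil

-- A's bucket at key c is exactly the subsequence of strings of that length.
theorem bucket_eq (unsorted : List String) (c : Int) :
    (unsorted.foldl (fun d i => d.modify (PySem.Str.len i) [] (fun b => b ++ [i]))
        (PySem.Dict.empty : PySem.Dict Int (List String))).getD c []
      = unsorted.filter (fun i => PySem.Str.len i == c) := by
  have h := PySem.Dict.getD_foldl_modify_append
    (unsorted.map (fun i => (PySem.Str.len i, i))) (PySem.Dict.empty : PySem.Dict Int (List String)) c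
  rw [List.foldl_map] at h
  simpa [List.filter_map, Function.comp_def, List.map_map] using h

theorem keys_eq (unsorted : List String) :
    (unsorted.foldl (fun d i => d.modify (PySem.Str.len i) [] (fun b => b ++ [i]))
        (PySem.Dict.empty : PySem.Dict Int (List String))).keys
      = PySem.Set.ofList (unsorted.map PySem.Str.len) := by
  have h := PySem.Dict.keys_foldl_modify_key unsorted (fun i => PySem.Str.len i) []
    (fun _ x => fun b => b ++ [x]) (PySem.Dict.empty : PySem.Dict Int (List String))
  simpa using h

-- proof-side name for A's intermediate list x (buckets in sorted key order)
def pvX (unsorted : List String) : List (List String) :=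
  (PySem.List.sorted
      (unsorted.foldl (fun d i => d.modify (PySem.Str.len i) [] (fun b => b ++ [i]))
        (PySem.Dict.empty : PySem.Dict Int (List String))).keys (fun n => n) false).map
    (fun n => (unsorted.foldl (fun d i => d.modify (PySem.Str.len i) [] (fun b => b ++ [i]))
        (PySem.Dict.empty : PySem.Dict Int (List String))).getD n [])

-- A as a flatMap over the sorted distinct lengths.
theorem bigSorting_eq_flatMap (unsorted : List String) :
    bigSorting unsorted
      = (PySem.List.sorted (PySem.Set.ofList (unsorted.map PySem.Str.len)) (fun n => n) false).flatMap
          (fun n => PySem.List.sorted (unsorted.filter (fun i => PySem.Str.len i == n)) (fun s => s) false) := by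
  have hflat : bigSorting unsorted
      = (PySem.List.pyRange 0 (PySem.List.len (pvX unsorted)) 1).foldl
          (fun res i => res ++ PySem.List.sorted (PySem.List.pyGetD (pvX unsorted) i []) (fun s => s) false) [] := rfl
  rw [hflat]
  rw [PySem.List.foldl_pyRange_pyGetD (pvX unsorted) ([] : List String)
    (fun res b => res ++ PySem.List.sorted b (fun s => s) false) [] (by norm_num)]
  rw [PySem.List.foldl_append_eq_flatMap]
  simp only [Int.toNat_zero, List.drop_zero, List.nil_append]
  unfold pvX
  rw [keys_eq, List.flatMap_map]
  exact List.flatMap_congr (fun n _ => by rw [bucket_eq])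

theorem flatMap_filter_perm {α κ : Type} [BEq κ] [LawfulBEq κ] (key : α → κ) :
    ∀ (ks : List κ) (xs : List α), ks.Nodup → (∀ x ∈ xs, key x ∈ ks) →
      (ks.flatMap (fun n => xs.filter (fun i => key i == n))).Perm xs := by
  intro ks
  induction ks with
  | nil =>
    intro xs _ hmem
    have : xs = [] := List.eq_nil_iff_forall_not_mem.2 (fun x hx => by simpa using hmem x hx)
    simp [this]
  | cons n ks ih =>
    intro xs hnd hmem
    rw [List.flatMap_cons]
    have hfilters : ∀ m ∈ ks,
        (xs.filter (fun i => !(key i == n))).filter (fun i => key i == m)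
          = xs.filter (fun i => key i == m) := by
      intro m hm
      rw [List.filter_filter]
      apply List.filter_congr
      intro x _
      by_cases hx : key x == m
      · have : ¬ (key x == n) = true := by
          simp only [beq_iff_eq] at hx ⊢
          rw [hx]
          intro hcon
          exact (List.nodup_cons.1 hnd).1 (hcon ▸ hm)
        simp [hx, this]
      · simp [Bool.eq_false_iff.2 hx]
    have hsub : ∀ x ∈ xs.filter (fun i => !(key i == n)), key x ∈ ks := by
      intro x hx
      have hx' := List.mem_filter.1 hx
      rcases List.mem_cons.1 (hmem x hx'.1) with h | h
      · exact absurd (beq_iff_eq.2 h) (by simpa using hx'.2)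
      · exact h
    have ihh := ih (xs.filter (fun i => !(key i == n))) (List.nodup_cons.1 hnd).2 hsub
    have heq : ks.flatMap (fun m => xs.filter (fun i => key i == m))
        = ks.flatMap (fun m => (xs.filter (fun i => !(key i == n))).filter (fun i => key i == m)) :=
      (List.flatMap_congr (fun m hm => (hfilters m hm).symm))
    have hperm : (ks.flatMap (fun m => xs.filter (fun i => key i == m))).Perm
        (xs.filter (fun i => !(key i == n))) := heq ▸ ihh
    exact (List.Perm.append_left _ hperm).trans (List.filter_append_perm _ xs)

theorem bigSorting_perm (unsorted : List String) : (bigSorting unsorted).Perm unsorted := by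
  rw [bigSorting_eq_flatMap]
  have h1 : ((PySem.List.sorted (PySem.Set.ofList (unsorted.map PySem.Str.len)) (fun n => n) false).flatMap
      (fun n => PySem.List.sorted (unsorted.filter (fun i => PySem.Str.len i == n)) (fun s => s) false)).Perm
      ((PySem.List.sorted (PySem.Set.ofList (unsorted.map PySem.Str.len)) (fun n => n) false).flatMap
      (fun n => unsorted.filter (fun i => PySem.Str.len i == n))) :=
    List.Perm.flatMap (List.Perm.refl _) (fun n _ => PySem.List.sorted_perm _ _ _)
  refine h1.trans ?_
  have hks : (PySem.List.sorted (PySem.Set.ofList (unsorted.map PySem.Str.len)) (fun n => n) false).Perm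
      (PySem.Set.ofList (unsorted.map PySem.Str.len)) := PySem.List.sorted_perm _ _ _
  have h2 := List.Perm.flatMap (g := fun n => unsorted.filter (fun i => PySem.Str.len i == n)) hks
    (fun n _ => List.Perm.refl _)
  refine h2.trans ?_
  apply flatMap_filter_perm
  · exact PySem.Set.nodup_ofList _
  · intro x hx
    rw [PySem.Set.mem_ofList]
    exact List.mem_map_of_mem hx

theorem bigSorting_pairwise (unsorted : List String) : (bigSorting unsorted).Pairwise lenLex := by
  rw [bigSorting_eq_flatMap]
  rw [List.pairwise_flatMap]
  constructor
  · intro n _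
    have hp := PySem.List.sorted_pairwise (unsorted.filter (fun i => PySem.Str.len i == n)) (fun s => s)
    refine List.Pairwise.imp_of_mem ?_ hp
    intro a b ha hb hab
    have ha' := List.mem_filter.1 ((PySem.List.mem_sorted _ _ _ _).1 ha)
    have hb' := List.mem_filter.1 ((PySem.List.mem_sorted _ _ _ _).1 hb)
    exact Or.inr ⟨by rw [beq_iff_eq.1 ha'.2, beq_iff_eq.1 hb'.2], hab⟩
  · have hlt := PySem.List.sorted_ofList_pairwise_lt (unsorted.map PySem.Str.len)
    refine List.Pairwise.imp_of_mem ?_ hlt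
    intro n m _ _ hnm a ha b hb
    have ha' := List.mem_filter.1 ((PySem.List.mem_sorted _ _ _ _).1 ha)
    have hb' := List.mem_filter.1 ((PySem.List.mem_sorted _ _ _ _).1 hb)
    exact Or.inl (by rw [beq_iff_eq.1 ha'.2, beq_iff_eq.1 hb'.2]; exact hnm)

-- ===== VERDICT (by name: the statement is the Claim_ definition above) =====
theorem bigSorting_spec : Claim_equal_bigSorting := by
  intro unsorted _
  unfold Spec_bigSorting
  refine List.Perm.eq_of_pairwise (le := lenLex) ?_ (bigSorting_pairwise unsorted) (alt_pairwise unsorted) ?_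
  · intro a b _ _ h1 h2; exact lenLex_antisymm a b h1 h2
  · exact (bigSorting_perm unsorted).trans (PySem.List.sorted2_perm unsorted _ _ _).symm
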